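-- pv_equiv track=rewrite | github.com/SIMO-007/optimization_algorithms_site | math_proj/algos/old_simplex.py | check_identiy
-- ===== SOURCE A (Python) =====
-- def check_identiy(a):
--     zero = 0
--     one = 0
--     for x in a:
--         if x == 0 : zero+=1
--         elif x == 1 : one+=1
--     if one == 1 and zero == len(a)-1:
--         return True
--     return False
-- ===== SOURCE B (Python) =====
-- def check_identiy(a):
--     valid = all(x == 0 or x == 1 for x in a)
--     ones = sum(1 for x in a if x == 1)
--     return valid and ones == 1
-- ===== Notes on version B (the rewrite author's own statement) =====
-- stated objective: simpler
-- what changed: Replaces the fused loop maintaining two counters compared against len(a)-1 by two separate passes: a 0/1 validity check and a count of ones, returning their conjunction.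
import Mathlib
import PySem

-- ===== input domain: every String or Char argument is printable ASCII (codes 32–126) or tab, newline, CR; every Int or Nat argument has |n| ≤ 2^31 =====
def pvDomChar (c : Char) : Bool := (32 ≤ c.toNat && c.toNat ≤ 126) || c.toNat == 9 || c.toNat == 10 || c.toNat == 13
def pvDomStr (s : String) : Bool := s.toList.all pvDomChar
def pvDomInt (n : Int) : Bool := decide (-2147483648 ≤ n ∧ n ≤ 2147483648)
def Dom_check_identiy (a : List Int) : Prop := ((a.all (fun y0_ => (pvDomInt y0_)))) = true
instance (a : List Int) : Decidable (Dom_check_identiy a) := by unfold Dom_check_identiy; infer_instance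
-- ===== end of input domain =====

-- B replaces A's fused two-counter loop by two separate passes (0/1 validity check, ones count); objective: simpler.


-- ===== PORT A =====
-- fused loop: one pass maintaining (zero, one) counters
def check_identiy (a : List Int) : Bool :=
  let st := a.foldl (fun (s : Int × Int) x =>
    if x = 0 then (s.1 + 1, s.2)
    else if x = 1 then (s.1, s.2 + 1)
    else s) (0, 0)
  if st.2 = 1 ∧ st.1 = (a.length : Int) - 1 then true else false

-- ===== PORT B =====
-- two passes: validity check, then ones count
def check_identiy_alt (a : List Int) : Bool :=
  let valid := a.all (fun x => x == 0 || x == 1)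
  let ones := a.foldl (fun (s : Int) x => if x = 1 then s + 1 else s) 0
  valid && ones == 1

-- ===== PRECONDITION & SPEC =====
def Spec_check_identiy (a : List Int) (out : Bool) : Prop := out = check_identiy_alt a
instance (a : List Int) (out : Bool) : Decidable (Spec_check_identiy a out) := by unfold Spec_check_identiy; infer_instance

-- ===== CLAIM (what is proved, stated in full; the proofs are below) =====
def Claim_equal_check_identiy : Prop := ∀ (a : List Int), Dom_check_identiy a → Spec_check_identiy a (check_identiy a)

-- ===== LEMMAS AND PROOFS =====

-- A's fold computes the counts of 0s and 1s (shifted by the initial state).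
theorem pvFoldA (a : List Int) (z o : Int) :
    a.foldl (fun (s : Int × Int) x =>
      if x = 0 then (s.1 + 1, s.2)
      else if x = 1 then (s.1, s.2 + 1)
      else s) (z, o)
    = (z + (a.countP (fun x => x == 0) : Int), o + (a.countP (fun x => x == 1) : Int)) := by
  induction a generalizing z o with
  | nil => simp
  | cons x t ih =>
    by_cases h0 : x = 0
    · simp [h0, List.countP_cons, ih]; ring_nf
    · by_cases h1 : x = 1
      · simp [h0, h1, List.countP_cons, ih]; ring_nf
      · simp [h0, h1, List.countP_cons, ih]

-- B's fold computes the count of 1s.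
theorem pvFoldB (a : List Int) (o : Int) :
    a.foldl (fun (s : Int) x => if x = 1 then s + 1 else s) o
    = o + (a.countP (fun x => x == 1) : Int) := by
  induction a generalizing o with
  | nil => simp
  | cons x t ih =>
    by_cases h1 : x = 1 <;> simp [h1, List.countP_cons, ih] <;> ring_nf

theorem pvCounts (a : List Int) :
    a.countP (fun x => x == 0) + a.countP (fun x => x == 1)
      = a.countP (fun x => x == 0 || x == 1) := by
  induction a with
  | nil => simp
  | cons x t ih =>
    by_cases h0 : x = 0
    · simp [h0, List.countP_cons, ← ih]; omega
    · by_cases h1 : x = 1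
      · simp [h1, ← ih]; omega
      · simp [h0, h1, ← ih]

-- ===== VERDICT (by name: the statement is the Claim_ definition above) =====
theorem check_identiy_spec : Claim_equal_check_identiy := by
  intro a _
  unfold Spec_check_identiy check_identiy check_identiy_alt
  simp only [pvFoldA, pvFoldB, zero_add]
  have hall : a.all (fun x => x == 0 || x == 1) = true
      ↔ a.countP (fun x => x == 0 || x == 1) = a.length := by
    rw [List.countP_eq_length, List.all_eq_true]
  have hle0 := List.countP_le_length (l := a) (p := fun x => x == 0)
  have hle01 := List.countP_le_length (l := a) (p := fun x => x == 0 || x == 1)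
  have hc := pvCounts a
  split_ifs with h
  · obtain ⟨ho, hz⟩ := h
    have ho' : a.countP (fun x => x == 1) = 1 := by exact_mod_cast ho
    have hz' : a.countP (fun x => x == 0) + 1 = a.length := by omega
    have hv : a.all (fun x => x == 0 || x == 1) = true := hall.mpr (by omega)
    simp [hv, ho']
  · rcases Bool.eq_false_or_eq_true (a.all (fun x => x == 0 || x == 1)) with hv | hv
    · have h01 := hall.mp hv
      simp only [hv, Bool.true_and]
      by_cases h1 : a.countP (fun x => x == 1) = 1
      · exact absurd ⟨by exact_mod_cast h1, by push_cast; omega⟩ h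
      · simp [h1]
    · simp [hv]
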